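-- pv_equiv track=rewrite | github.com/cogburner/Quantum-Schwinger | schwinger_hamiltonian.py | generate_weight_one_pauli
-- ===== SOURCE A (Python) =====
-- from collections import deque
--
-- def generate_weight_one_pauli(pauli_label, num_qubits):
--     pauli_labels = []
--     wt1 = deque(["I"] * (num_qubits - 1) + [pauli_label])
--     for i in range(num_qubits):
--         wt1_term = "".join(literal for literal in wt1)
--         pauli_labels.append(wt1_term)
--         wt1.rotate(-1)
--     return pauli_labels
-- ===== SOURCE B (Python) =====
-- def generate_weight_one_pauli(pauli_label, num_qubits):
--     # Build each string directly by index arithmetic: string i has the label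
--     # at position num_qubits-1-i; no deque or rotating state is maintained.
--     return ["I" * (num_qubits - 1 - i) + pauli_label + "I" * i
--             for i in range(num_qubits)]
-- ===== Notes on version B (the rewrite author's own statement) =====
-- stated objective: simpler
-- what changed: Each Pauli string is built independently in closed form from its index ('I'*(n-1-i) + label + 'I'*i) instead of maintaining a deque that is re-joined and rotated once per iteration.
import Mathlib
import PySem

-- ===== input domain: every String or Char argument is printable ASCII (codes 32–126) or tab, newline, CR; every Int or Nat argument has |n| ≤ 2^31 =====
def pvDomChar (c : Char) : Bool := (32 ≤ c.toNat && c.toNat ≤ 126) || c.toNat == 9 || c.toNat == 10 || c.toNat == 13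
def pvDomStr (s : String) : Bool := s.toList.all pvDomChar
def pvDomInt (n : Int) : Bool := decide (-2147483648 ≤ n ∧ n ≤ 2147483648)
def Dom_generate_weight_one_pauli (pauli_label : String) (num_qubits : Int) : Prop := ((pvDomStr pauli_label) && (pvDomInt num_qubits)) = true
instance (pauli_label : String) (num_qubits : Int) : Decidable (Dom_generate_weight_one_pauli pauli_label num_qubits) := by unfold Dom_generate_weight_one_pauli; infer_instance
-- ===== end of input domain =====

-- B builds each string directly in closed form from its index instead of
-- joining and rotating a deque; structural simplification only (same cost class).

-- ===== PORT A =====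
-- deque.rotate(-1): move the first element to the back (exact for a one-step left rotation)
def pvRot1 (xs : List String) : List String :=
  match xs with
  | [] => []
  | x :: rest => rest ++ [x]

def generate_weight_one_pauli (pauli_label : String) (num_qubits : Int) : List String :=
  -- wt1 = deque(["I"] * (num_qubits - 1) + [pauli_label])
  let wt1 : List String := PySem.List.pyRepeat ["I"] (num_qubits - 1) ++ [pauli_label]
  let res := (PySem.List.pyRange 0 num_qubits 1).foldl
    (fun (st : List String × List String) _ =>
      let wt1_term := PySem.Str.join "" st.2
      (st.1 ++ [wt1_term], pvRot1 st.2))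
    ([], wt1)
  res.1

-- ===== PORT B =====
-- "I" * k (Python str*int; exact: empty for k ≤ 0)
def pvStrMulI (k : Int) : String := PySem.Str.join "" (List.replicate k.toNat "I")

def generate_weight_one_pauli_alt (pauli_label : String) (num_qubits : Int) : List String :=
  (PySem.List.pyRange 0 num_qubits 1).map
    (fun i => pvStrMulI (num_qubits - 1 - i) ++ pauli_label ++ pvStrMulI i)

-- ===== PRECONDITION & SPEC =====
def Spec_generate_weight_one_pauli (pauli_label : String) (num_qubits : Int) (out : List String) : Prop := out = generate_weight_one_pauli_alt pauli_label num_qubits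
instance (pauli_label : String) (num_qubits : Int) (out : List String) : Decidable (Spec_generate_weight_one_pauli pauli_label num_qubits out) := by unfold Spec_generate_weight_one_pauli; infer_instance

-- ===== CLAIM (what is proved, stated in full; the proofs are below) =====
def Claim_equal_generate_weight_one_pauli : Prop := ∀ (pauli_label : String) (num_qubits : Int), Dom_generate_weight_one_pauli pauli_label num_qubits → Spec_generate_weight_one_pauli pauli_label num_qubits (generate_weight_one_pauli pauli_label num_qubits)

-- ===== LEMMAS AND PROOFS =====

-- the k-fold one-step rotation
def pvRotN (k : Nat) (xs : List String) : List String := pvRot1^[k] xs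

-- A's fold unrolled: it appends the joins of successive rotations
theorem pvFoldA (l : List Int) (acc w : List String) :
    (l.foldl (fun (st : List String × List String) _ =>
        (st.1 ++ [PySem.Str.join "" st.2], pvRot1 st.2)) (acc, w)).1
      = acc ++ (List.range l.length).map (fun k => PySem.Str.join "" (pvRotN k w)) := by
  induction l generalizing acc w with
  | nil => simp
  | cons x xs ih =>
      simp only [List.foldl_cons, ih, List.length_cons, List.range_succ_eq_map]
      simp [pvRotN, Function.iterate_succ_apply, List.map_map, Function.comp_def]

-- shape of the deque after k rotations (k within bounds)
theorem pvRotN_shape (L : String) (a k : Nat) (hk : k ≤ a) :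
    pvRotN k (List.replicate a "I" ++ [L])
      = List.replicate (a - k) "I" ++ [L] ++ List.replicate k "I" := by
  induction k with
  | zero => simp [pvRotN]
  | succ k ih =>
      have hk' : k ≤ a := Nat.le_of_succ_le hk
      have h1 : a - k = (a - (k + 1)) + 1 := by omega
      rw [pvRotN, Function.iterate_succ_apply', ← pvRotN, ih hk', h1]
      simp only [List.replicate_succ, List.cons_append, pvRot1, List.append_assoc]
      rw [← List.replicate_succ', List.replicate_succ]

-- "".join over List Char pieces is flatten
theorem pvJoinNilFlatten (ls : List (List Char)) : PySem.Chars.join [] ls = ls.flatten := by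
  induction ls with
  | nil => rfl
  | cons x xs ih =>
      cases xs with
      | nil => simp [PySem.Chars.join, List.intercalate]
      | cons y ys =>
          rw [PySem.Chars.join_cons_cons, ih]
          simp

-- join with empty separator distributes as concatenation of the pieces
theorem pvJoin_piece (L : String) (a b : Nat) :
    PySem.Str.join "" (List.replicate a "I" ++ [L] ++ List.replicate b "I")
      = pvStrMulI (a : Int) ++ L ++ pvStrMulI (b : Int) := by
  apply String.ext
  simp only [pvStrMulI, Int.toNat_natCast, String.toList_append, PySem.Str.toList_join,
    List.map_append, List.map_replicate, List.map_cons, List.map_nil]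
  rw [show ("" : String).toList = [] from rfl]
  rw [pvJoinNilFlatten, pvJoinNilFlatten, pvJoinNilFlatten]
  simp only [List.flatten_append, List.flatten_cons, List.flatten_nil, List.append_nil]

-- ===== VERDICT (by name: the statement is the Claim_ definition above) =====
theorem generate_weight_one_pauli_spec : Claim_equal_generate_weight_one_pauli := by
  intro L n _
  unfold Spec_generate_weight_one_pauli generate_weight_one_pauli generate_weight_one_pauli_alt
  rw [pvFoldA, PySem.List.pyRepeat_singleton, PySem.List.pyRange_one]
  simp only [List.nil_append, List.map_map, List.length_map, List.length_range, Int.sub_zero,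
    Function.comp_def, zero_add]
  apply List.map_congr_left
  intro k hk
  have hkm : k < n.toNat := List.mem_range.mp hk
  have hka : k ≤ (n - 1).toNat := by omega
  rw [pvRotN_shape L _ k hka, pvJoin_piece]
  have h1 : (n - 1 - (k : Int)).toNat = (n - 1).toNat - k := by omega
  simp only [pvStrMulI, h1, Int.toNat_natCast]
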